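-- pv_equiv track=rewrite | github.com/bhatti/agentic-patterns | patterns/trustworthy-generation/example.py | _has_domain_keywords
-- ===== SOURCE A (Python) =====
-- def _has_domain_keywords(query: str) -> bool:
--     """Check if query contains domain-specific keywords."""
--     query_lower = query.lower()
--     # Medical-related terms that indicate medical domain
--     medical_indicators = [
--         "medical", "health", "symptom", "treatment", "diagnosis",
--         "disease", "condition", "medication", "therapy", "patient",
--         "blood", "pressure", "diabetes", "cold", "infection",
--         "doctor", "hospital", "medicine", "prescription", "cure"
--     ]
--     return any(indicator in query_lower for indicator in medical_indicators)
-- ===== SOURCE B (Python) =====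
-- # Keywords indexed by their first letter: the scan looks at each text
-- # position once and only tests the keywords whose first letter matches.
-- _KW_BY_FIRST = {
--     "m": ("medical", "medication", "medicine"),
--     "h": ("health", "hospital"),
--     "s": ("symptom",),
--     "t": ("treatment", "therapy"),
--     "d": ("diagnosis", "disease", "diabetes", "doctor"),
--     "c": ("condition", "cold", "cure"),
--     "b": ("blood",),
--     "p": ("patient", "pressure", "prescription"),
--     "i": ("infection",),
-- }
--
--
-- def _has_domain_keywords(query: str) -> bool:
--     """Check if query contains domain-specific keywords (first-letter
--     dispatch: one pass over the lowered text, testing only the keywords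
--     that start with the character at the current position)."""
--     q = query.lower()
--     for i, ch in enumerate(q):
--         for kw in _KW_BY_FIRST.get(ch, ()):
--             if q.startswith(kw, i):
--                 return True
--     return False
-- ===== Notes on version B (the rewrite author's own statement) =====
-- stated objective: alternative
-- what changed: Replaces the twenty independent substring searches with a single left-to-right scan over the lowered text that, at each position, consults a first-letter index and tests only the keywords starting with the current character.
import Mathlib
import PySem

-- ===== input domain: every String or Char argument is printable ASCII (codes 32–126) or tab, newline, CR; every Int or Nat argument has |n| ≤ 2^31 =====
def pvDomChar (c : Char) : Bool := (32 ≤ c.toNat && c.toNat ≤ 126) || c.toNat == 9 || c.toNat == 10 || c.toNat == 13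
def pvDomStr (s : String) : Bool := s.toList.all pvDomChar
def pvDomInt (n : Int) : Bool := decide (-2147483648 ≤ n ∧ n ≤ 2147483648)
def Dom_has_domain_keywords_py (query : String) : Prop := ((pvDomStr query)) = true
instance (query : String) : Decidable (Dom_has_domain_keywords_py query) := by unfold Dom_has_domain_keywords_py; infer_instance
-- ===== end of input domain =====

-- B replaces A's twenty independent substring searches with one left-to-right scan of the
-- lowered text that dispatches through a first-letter index at each position (alternative).

-- ===== PORT A =====
def medicalIndicators : List String :=
  ["medical", "health", "symptom", "treatment", "diagnosis",
   "disease", "condition", "medication", "therapy", "patient",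
   "blood", "pressure", "diabetes", "cold", "infection",
   "doctor", "hospital", "medicine", "prescription", "cure"]

def has_domain_keywords_py (query : String) : Bool :=
  let queryLower := PySem.Str.lower query
  medicalIndicators.any (fun indicator => PySem.Str.isIn indicator queryLower)

-- ===== PORT B =====
-- the first-letter index _KW_BY_FIRST (keyword character lists grouped by first letter;
-- .get with default () is the wildcard branch returning [])
def kwByFirst : Char → List (List Char)
  | 'm' => [String.toList "medical", String.toList "medication", String.toList "medicine"]
  | 'h' => [String.toList "health", String.toList "hospital"]
  | 's' => [String.toList "symptom"]
  | 't' => [String.toList "treatment", String.toList "therapy"]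
  | 'd' => [String.toList "diagnosis", String.toList "disease",
            String.toList "diabetes", String.toList "doctor"]
  | 'c' => [String.toList "condition", String.toList "cold", String.toList "cure"]
  | 'b' => [String.toList "blood"]
  | 'p' => [String.toList "patient", String.toList "pressure", String.toList "prescription"]
  | 'i' => [String.toList "infection"]
  | _   => []

-- the enumerate loop: walk the suffixes (position i ↦ suffix c :: t), at each one test
-- exactly the keywords in the bucket of the current character
def bucketScan : List Char → Bool
  | [] => false
  | c :: t =>
      (kwByFirst c).any (fun kw => PySem.Chars.startswith (c :: t) kw) || bucketScan t

def has_domain_keywords_py_alt (query : String) : Bool :=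
  bucketScan (PySem.Chars.lower query.toList)

-- ===== PRECONDITION & SPEC =====
def Spec_has_domain_keywords_py (query : String) (out : Bool) : Prop := out = has_domain_keywords_py_alt query
instance (query : String) (out : Bool) : Decidable (Spec_has_domain_keywords_py query out) := by unfold Spec_has_domain_keywords_py; infer_instance

-- ===== CLAIM (what is proved, stated in full; the proofs are below) =====
def Claim_equal_has_domain_keywords_py : Prop := ∀ (query : String), Dom_has_domain_keywords_py query → Spec_has_domain_keywords_py query (has_domain_keywords_py query)

-- ===== LEMMAS AND PROOFS =====

-- A's keyword list, as character lists (proof-side name; both ports' literals map to it)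
def kwChars : List (List Char) := medicalIndicators.map String.toList

-- every bucket entry belongs to the keyword list and starts with the bucket's character
theorem kwByFirst_all (c : Char) :
    (kwByFirst c).all (fun kw => decide (kw ∈ kwChars) && (kw.head? == some c)) = true := by
  unfold kwByFirst
  split <;> rfl

theorem kwByFirst_sound (c : Char) (kw : List Char) (h : kw ∈ kwByFirst c) :
    kw ∈ kwChars ∧ kw.head? = some c := by
  have := List.all_eq_true.mp (kwByFirst_all c) kw h
  simpa using this

-- every keyword is in the bucket of its first character
theorem kwByFirst_complete (kw : List Char) (h : kw ∈ kwChars) :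
    kw ∈ kwByFirst (kw.headD 'x') := by
  fin_cases h <;> decide

-- at a nonempty suffix, the bucket test equals the full keyword-list test
theorem bucket_any_eq (c : Char) (t : List Char) :
    (kwByFirst c).any (fun kw => PySem.Chars.startswith (c :: t) kw)
      = kwChars.any (fun kw => PySem.Chars.startswith (c :: t) kw) := by
  rw [Bool.eq_iff_iff]
  simp only [List.any_eq_true]
  constructor
  · rintro ⟨kw, hkw, hs⟩
    exact ⟨kw, (kwByFirst_sound c kw hkw).1, hs⟩
  · rintro ⟨kw, hkw, hs⟩
    refine ⟨kw, ?_, hs⟩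
    have hpre := (PySem.Chars.startswith_iff _ _).mp hs
    have hne : kw ≠ [] := by
      -- every keyword is nonempty
      fin_cases hkw <;> decide
    obtain ⟨a, kt, rfl⟩ := List.exists_cons_of_ne_nil hne
    have hac : c = a := by
      rcases hpre with ⟨r, hr⟩
      simpa using congrArg List.head? hr.symm
    rw [hac]
    simpa using kwByFirst_complete (a :: kt) hkw

-- the position scan finds a keyword iff some keyword is an infix of the text
theorem bucketScan_eq_any_isIn (s : List Char) :
    bucketScan s = kwChars.any (fun kw => PySem.Chars.isIn kw s) := by
  induction s with
  | nil => decide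
  | cons c t ih =>
      rw [bucketScan, bucket_any_eq, ih, Bool.eq_iff_iff]
      simp only [Bool.or_eq_true, List.any_eq_true, PySem.Chars.startswith_iff,
        PySem.Chars.isIn_iff_infix, List.infix_cons_iff]
      constructor
      · rintro (⟨x, hx, h⟩ | ⟨x, hx, h⟩)
        · exact ⟨x, hx, Or.inl h⟩
        · exact ⟨x, hx, Or.inr h⟩
      · rintro ⟨x, hx, h | h⟩
        · exact Or.inl ⟨x, hx, h⟩
        · exact Or.inr ⟨x, hx, h⟩

-- ===== VERDICT (by name: the statement is the Claim_ definition above) =====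
theorem has_domain_keywords_py_spec : Claim_equal_has_domain_keywords_py := by
  intro query _
  show _ = _
  rw [has_domain_keywords_py_alt, bucketScan_eq_any_isIn, has_domain_keywords_py]
  simp only [kwChars, List.any_map]
  apply PySem.List.any_congr_mem
  intro kw _
  rw [Bool.eq_iff_iff]
  simp [PySem.Chars.isIn_iff_infix, PySem.Str.lower]
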